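-- pv_equiv track=rewrite | github.com/RIshimoto/AtCoder_myPractice | ARC/ARC122/arc122_a.py | solve
-- ===== SOURCE A (Python) =====
-- def solve(N, A):
--     MOD = 10**9+7
--     if N < 2:
--         return A[0]
--     cnt = [[0 for _ in range(2)] for _ in range(N)]
--     cnt[1][0] = cnt[1][1] = 1
--     for i in range(1, N-1):
--         cnt[i+1][0] += cnt[i][0] + cnt[i][1]
--         cnt[i+1][1] += cnt[i][0]
--
--     dp = [[0 for _ in range(2)] for _ in range(N)]
--     dp[1][0] = A[0] + A[1]
--     dp[1][1] = A[0] - A[1]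
--     for i in range(1, N-1):
--         dp[i+1][0] += dp[i][0] + cnt[i][0] * A[i+1]
--         dp[i+1][0] += dp[i][1] + cnt[i][1] * A[i+1]
--         dp[i+1][1] += dp[i][0] - cnt[i][0] * A[i+1]
--     ans = (dp[N-1][0] + dp[N-1][1]) %  MOD
--     return ans
-- ===== SOURCE B (Python) =====
-- def solve(N, A):
--     # Backward sign-weight sweep + dot product instead of A's forward dp table.
--     MOD = 10**9 + 7
--     if N < 2:
--         return A[0]
--     # per-index configuration counts (same Fibonacci-style recurrence as A's cnt)
--     cnt0 = [0, 1]
--     cnt1 = [0, 1]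
--     for i in range(1, N - 1):
--         cnt0.append(cnt0[i] + cnt1[i])
--         cnt1.append(cnt0[i])
--     # sweep backward, carrying the weights (w0, w1) of the two dp states and
--     # accumulating each element's net signed contribution on the fly
--     w0, w1 = 1, 1
--     total = 0
--     for i in range(N - 2, 0, -1):
--         total += ((cnt0[i] + cnt1[i]) * w0 - cnt0[i] * w1) * A[i + 1]
--         w0, w1 = w0 + w1, w0
--     total += (w0 + w1) * A[0] + (w0 - w1) * A[1]
--     return total % MOD
-- ===== Notes on version B (the rewrite author's own statement) =====
-- stated objective: alternative
-- what changed: Replaces A's forward dp-value table (dp[i][0/1] accumulating signed sums) by a backward sweep that carries the weights of the two dp states and accumulates each element's net signed contribution on the fly, ending in a single dot-product-style total; only the Fibonacci-style cnt recurrence is shared.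
import Mathlib
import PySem

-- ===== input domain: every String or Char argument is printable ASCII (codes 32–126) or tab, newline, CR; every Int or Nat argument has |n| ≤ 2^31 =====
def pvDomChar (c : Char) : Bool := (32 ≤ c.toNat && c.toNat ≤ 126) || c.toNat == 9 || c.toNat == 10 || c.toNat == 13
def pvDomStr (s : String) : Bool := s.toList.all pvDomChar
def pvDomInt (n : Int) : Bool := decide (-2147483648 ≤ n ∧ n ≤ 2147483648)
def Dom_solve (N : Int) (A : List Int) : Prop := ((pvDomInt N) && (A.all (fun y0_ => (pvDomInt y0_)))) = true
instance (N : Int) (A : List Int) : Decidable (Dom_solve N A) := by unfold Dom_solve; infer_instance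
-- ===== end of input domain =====

-- B replaces A's forward dp-value table by a backward sweep of state weights plus an
-- on-the-fly signed-contribution total (alternative decomposition, same O(N) cost).


-- ===== PORT A =====
def solve (N : Int) (A : List Int) : Int :=
  let M : Int := 10 ^ 9 + 7
  if N < 2 then PySem.List.pyGetD A 0 0
  else
    let cntInit : List (Int × Int) :=
      PySem.List.pySetD ((PySem.List.pyRange 0 N 1).map (fun _ => ((0 : Int), (0 : Int)))) 1 (1, 1)
    let cnt := (PySem.List.pyRange 1 (N - 1) 1).foldl (fun c i =>
      let ci := PySem.List.pyGetD c i ((0 : Int), (0 : Int))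
      let ci1 := PySem.List.pyGetD c (i + 1) ((0 : Int), (0 : Int))
      PySem.List.pySetD c (i + 1) (ci1.1 + ci.1 + ci.2, ci1.2 + ci.1)) cntInit
    let a0 := PySem.List.pyGetD A 0 0
    let a1 := PySem.List.pyGetD A 1 0
    let dpInit : List (Int × Int) :=
      PySem.List.pySetD ((PySem.List.pyRange 0 N 1).map (fun _ => ((0 : Int), (0 : Int)))) 1 (a0 + a1, a0 - a1)
    let dp := (PySem.List.pyRange 1 (N - 1) 1).foldl (fun d i =>
      let di := PySem.List.pyGetD d i ((0 : Int), (0 : Int))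
      let ci := PySem.List.pyGetD cnt i ((0 : Int), (0 : Int))
      let ai1 := PySem.List.pyGetD A (i + 1) 0
      let di1 := PySem.List.pyGetD d (i + 1) ((0 : Int), (0 : Int))
      PySem.List.pySetD d (i + 1)
        (di1.1 + di.1 + ci.1 * ai1 + di.2 + ci.2 * ai1, di1.2 + di.1 - ci.1 * ai1)) dpInit
    let last := PySem.List.pyGetD dp (N - 1) ((0 : Int), (0 : Int))
    PySem.Int.mod (last.1 + last.2) M

-- ===== PORT B =====
def solve_alt (N : Int) (A : List Int) : Int :=
  let M : Int := 10 ^ 9 + 7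
  if N < 2 then PySem.List.pyGetD A 0 0
  else
    let cnt := (PySem.List.pyRange 1 (N - 1) 1).foldl (fun (p : List Int × List Int) i =>
      let c0 := PySem.List.pyGetD p.1 i 0
      let c1 := PySem.List.pyGetD p.2 i 0
      (p.1 ++ [c0 + c1], p.2 ++ [c0])) ([0, 1], [0, 1])
    let st := (PySem.List.pyRange (N - 2) 0 (-1)).foldl (fun (s : Int × Int × Int) i =>
      let c0 := PySem.List.pyGetD cnt.1 i 0
      let c1 := PySem.List.pyGetD cnt.2 i 0
      (s.1 + s.2.1, s.1, s.2.2 + ((c0 + c1) * s.1 - c0 * s.2.1) * PySem.List.pyGetD A (i + 1) 0))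
      ((1 : Int), (1 : Int), (0 : Int))
    PySem.Int.mod (st.2.2 + (st.1 + st.2.1) * PySem.List.pyGetD A 0 0
      + (st.1 - st.2.1) * PySem.List.pyGetD A 1 0) M

-- ===== PRECONDITION & SPEC =====
-- Pre_ excludes exactly the inputs where Python A raises IndexError: an empty list when
-- N < 2 (A[0]), and a list shorter than N when N ≥ 2 (A[i] indexing up to A[N-1]).
def Pre_solve (N : Int) (A : List Int) : Prop :=
  (N < 2 → A ≠ []) ∧ (2 ≤ N → N ≤ (A.length : Int))
instance (N : Int) (A : List Int) : Decidable (Pre_solve N A) := by unfold Pre_solve; infer_instance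
def pvWitness_solve : Int × List Int := (3, [1, 2, 3])

def Spec_solve (N : Int) (A : List Int) (out : Int) : Prop := out = solve_alt N A
instance (N : Int) (A : List Int) (out : Int) : Decidable (Spec_solve N A out) := by unfold Spec_solve; infer_instance

-- ===== CLAIM (what is proved, stated in full; the proofs are below) =====
def Claim_equal_solve : Prop := ∀ (N : Int) (A : List Int), Dom_solve N A → Pre_solve N A → Spec_solve N A (solve N A)

-- ===== LEMMAS AND PROOFS =====

-- the shared count recurrence (cnt[j] of A, (cnt0[j], cnt1[j]) of B)
def pvC : Nat → Int × Int
  | 0 => (0, 0)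
  | 1 => (1, 1)
  | (n + 2) => ((pvC (n + 1)).1 + (pvC (n + 1)).2, (pvC (n + 1)).1)

-- A's dp row j as a recursive function
def pvDp (A : List Int) : Nat → Int × Int
  | 0 => (0, 0)
  | 1 => (A.getD 0 0 + A.getD 1 0, A.getD 0 0 - A.getD 1 0)
  | (n + 2) => ((pvDp A (n + 1)).1 + (pvC (n + 1)).1 * A.getD (n + 2) 0
                  + (pvDp A (n + 1)).2 + (pvC (n + 1)).2 * A.getD (n + 2) 0,
                (pvDp A (n + 1)).1 - (pvC (n + 1)).1 * A.getD (n + 2) 0)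

lemma getD_map_range' {α : Type} [Inhabited α] (g : Nat → α) (d : α) (n j : Nat) (h : j < n) :
    ((List.range n).map g).getD j d = g j := by
  simp [List.getD, h]

lemma pyGetD_one (xs : List Int) (d : Int) : PySem.List.pyGetD xs 1 d = xs.getD 1 d := by
  have h : (1 : Int) = ((1 : Nat) : Int) := rfl
  rw [h, PySem.List.pyGetD_natCast]

-- generic shape of A's two index-writing folds over range(1, N-1)
lemma genA_fold (m : Nat) (F : Int → Int × Int → Int × Int → Int × Int) (G : Nat → Int × Int)
    (v1 : Int × Int) (hG0 : G 0 = (0, 0)) (hv1 : G 1 = v1)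
    (hstep : ∀ j : Nat, j ≤ m → F (1 + (j:Int)) (G (j+1)) (0, 0) = G (j+2)) :
    ∀ k : Nat, k ≤ m →
    (PySem.List.pyRange 1 (1 + (k:Int)) 1).foldl
      (fun c i => PySem.List.pySetD c (i+1)
        (F i (PySem.List.pyGetD c i ((0:Int),(0:Int))) (PySem.List.pyGetD c (i+1) ((0:Int),(0:Int)))))
      (PySem.List.pySetD ((PySem.List.pyRange 0 ((m:Int)+2) 1).map (fun _ => ((0:Int),(0:Int)))) 1 v1)
    = (List.range (m+2)).map (fun j => if j ≤ k + 1 then G j else (0, 0)) := by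
  intro k
  induction k with
  | zero =>
    intro _
    have h0 : PySem.List.pyRange 1 (1 + ((0:Nat):Int)) 1 = [] :=
      PySem.List.pyRange_one_eq_nil (by norm_num)
    rw [h0, List.foldl_nil, PySem.List.pySetD_of_nonneg _ v1 (by norm_num)]
    apply List.ext_getElem
    · simp [PySem.List.length_pyRange_one]
      omega
    · intro i h1 h2
      simp only [Int.toNat_one, List.getElem_set, List.getElem_map, List.getElem_range]
      rcases i with _ | _ | i
      · simp [hG0]
      · simp [hv1]
      · simp
  | succ j ih =>
    intro hk
    have h1 : (1 : Int) + ((j+1 : Nat) : Int) = (1 + (j:Int)) + 1 := by push_cast; ring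
    rw [h1, PySem.List.pyRange_one_succ_right (by omega), List.foldl_append, ih (by omega)]
    simp only [List.foldl_cons, List.foldl_nil]
    have e1 : (1:Int) + (j:Int) = ((j+1 : Nat) : Int) := by push_cast; ring
    have e2 : (1:Int) + (j:Int) + 1 = ((j+2 : Nat) : Int) := by push_cast; ring
    rw [e2, e1, PySem.List.pyGetD_natCast, PySem.List.pyGetD_natCast, PySem.List.pySetD_natCast]
    rw [getD_map_range' _ _ _ _ (by omega), getD_map_range' _ _ _ _ (by omega)]
    rw [if_pos (by omega), if_neg (by omega)]
    apply List.ext_getElem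
    · simp
    · intro i hi1 hi2
      simp only [List.getElem_set, List.getElem_map, List.getElem_range]
      by_cases hij : j + 2 = i
      · rw [if_pos hij, ← hij, if_pos (by omega), ← e1]
        exact hstep j (by omega)
      · rw [if_neg hij]
        by_cases hle : i ≤ j + 1
        · rw [if_pos hle, if_pos (by omega)]
        · rw [if_neg hle, if_neg (by omega)]

-- B's cnt-building fold
lemma cntB_fold (k : Nat) :
  (PySem.List.pyRange 1 (1 + (k:Int)) 1).foldl
    (fun (p : List Int × List Int) i =>
      let c0 := PySem.List.pyGetD p.1 i 0
      let c1 := PySem.List.pyGetD p.2 i 0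
      (p.1 ++ [c0 + c1], p.2 ++ [c0])) ([0, 1], [0, 1])
  = ((List.range (k+2)).map (fun j => (pvC j).1), (List.range (k+2)).map (fun j => (pvC j).2)) := by
  induction k with
  | zero =>
    simp [PySem.List.pyRange_one_eq_nil]
    constructor <;>
      · apply List.ext_getElem
        · simp
        · intro i h1 h2
          simp only [List.length_map, List.length_range] at h2
          simp only [List.getElem_map, List.getElem_range]
          interval_cases i <;> rfl
  | succ m ih =>
    have h1 : (1 : Int) + ((m+1 : Nat) : Int) = (1 + (m:Int)) + 1 := by push_cast; ring
    rw [h1, PySem.List.pyRange_one_succ_right (by omega), List.foldl_append, ih]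
    simp only [List.foldl_cons, List.foldl_nil]
    have hg : ∀ f : Nat → Int, PySem.List.pyGetD ((List.range (m+2)).map (fun j => f j)) (1 + (m:Int)) 0 = f (m+1) := by
      intro f
      have h2 : (1 : Int) + (m:Int) = ((m+1 : Nat) : Int) := by push_cast; ring
      rw [h2, PySem.List.pyGetD_natCast]
      simp [List.getD]
    rw [hg, hg]
    have h2 : m + 1 + 2 = m + 2 + 1 := rfl
    simp [h2, List.range_succ, pvC]

-- B's backward weight sweep against A's dp rows
lemma bwd_fold (A c0s c1s : List Int) (m : Nat)
    (h0 : ∀ j : Nat, j < m + 2 → c0s.getD j 0 = (pvC j).1)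
    (h1 : ∀ j : Nat, j < m + 2 → c1s.getD j 0 = (pvC j).2) :
    ∀ k : Nat, k ≤ m → ∀ w0 w1 t : Int,
    (fun st : Int × Int × Int =>
        st.1 * (pvDp A 1).1 + st.2.1 * (pvDp A 1).2 + st.2.2)
      ((PySem.List.pyRange (k:Int) 0 (-1)).foldl
        (fun (s : Int × Int × Int) i =>
          (s.1 + s.2.1, s.1, s.2.2 + ((PySem.List.pyGetD c0s i 0 + PySem.List.pyGetD c1s i 0) * s.1
            - PySem.List.pyGetD c0s i 0 * s.2.1) * PySem.List.pyGetD A (i + 1) 0))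
        (w0, w1, t))
    = w0 * (pvDp A (k+1)).1 + w1 * (pvDp A (k+1)).2 + t := by
  intro k
  induction k with
  | zero =>
    intro _ w0 w1 t
    rw [PySem.List.pyRange_neg_one_eq_nil (by norm_num), List.foldl_nil]
  | succ j ih =>
    intro hk w0 w1 t
    have hc : ((j+1 : Nat) : Int) - 1 = ((j : Nat) : Int) := by push_cast; ring
    rw [PySem.List.pyRange_neg_one_cons (by positivity), hc, List.foldl_cons]
    rw [ih (by omega)]
    have e1 : ((j+1 : Nat) : Int) + 1 = ((j+2 : Nat) : Int) := by push_cast; ring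
    rw [e1, PySem.List.pyGetD_natCast, PySem.List.pyGetD_natCast, PySem.List.pyGetD_natCast]
    rw [h0 (j+1) (by omega), h1 (j+1) (by omega)]
    show _ = w0 * (pvDp A (j+2)).1 + w1 * (pvDp A (j+2)).2 + t
    simp only [pvDp]
    ring

-- the final dot-product step of B, read against the invariant of bwd_fold
lemma dot_eq (A : List Int) (s : Int × Int × Int) (X : Int)
    (h : s.1 * (pvDp A 1).1 + s.2.1 * (pvDp A 1).2 + s.2.2 = X) :
    s.2.2 + (s.1 + s.2.1) * PySem.List.pyGetD A 0 0 + (s.1 - s.2.1) * PySem.List.pyGetD A 1 0 = X := by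
  rw [← h]
  simp only [pvDp, PySem.List.pyGetD_zero, pyGetD_one]
  ring

lemma solveA_char (A : List Int) (m : Nat) :
    solve ((m:Int)+2) A = PySem.Int.mod ((pvDp A (m+1)).1 + (pvDp A (m+1)).2) (10^9+7) := by
  simp only [solve]
  rw [if_neg (by omega)]
  have eb : (m:Int) + 2 - 1 = 1 + (m:Int) := by ring
  rw [eb]
  have hcnt := genA_fold m (fun i ci ci1 => (ci1.1 + ci.1 + ci.2, ci1.2 + ci.1)) pvC (1,1)
    rfl rfl (by
      intro j _
      simp only [pvC, Prod.mk.injEq]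
      constructor <;> ring) m le_rfl
  simp only at hcnt
  rw [hcnt]
  have hmapC : (List.range (m+2)).map (fun j => if j ≤ m + 1 then pvC j else ((0:Int), (0:Int)))
      = (List.range (m+2)).map pvC := by
    apply List.map_congr_left
    intro x hx
    rw [List.mem_range] at hx
    rw [if_pos (by omega)]
  rw [hmapC]
  have hdp := genA_fold m
    (fun i di di1 =>
      (di1.1 + di.1 + (PySem.List.pyGetD ((List.range (m+2)).map pvC) i ((0:Int),(0:Int))).1 * PySem.List.pyGetD A (i+1) 0
        + di.2 + (PySem.List.pyGetD ((List.range (m+2)).map pvC) i ((0:Int),(0:Int))).2 * PySem.List.pyGetD A (i+1) 0,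
       di1.2 + di.1 - (PySem.List.pyGetD ((List.range (m+2)).map pvC) i ((0:Int),(0:Int))).1 * PySem.List.pyGetD A (i+1) 0))
    (pvDp A)
    (PySem.List.pyGetD A 0 0 + PySem.List.pyGetD A 1 0, PySem.List.pyGetD A 0 0 - PySem.List.pyGetD A 1 0)
    rfl
    (by simp [pvDp, PySem.List.pyGetD_zero, pyGetD_one])
    (by
      intro j hj
      have e1 : (1:Int) + (j:Int) = ((j+1 : Nat) : Int) := by push_cast; ring
      have e2 : (1:Int) + (j:Int) + 1 = ((j+2 : Nat) : Int) := by push_cast; ring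
      beta_reduce
      rw [e2, e1]
      simp only [PySem.List.pyGetD_natCast]
      rw [getD_map_range' _ _ _ _ (by omega)]
      simp only [pvDp, Prod.mk.injEq]
      constructor <;> ring)
    m le_rfl
  simp only at hdp
  rw [hdp]
  have em : (1:Int) + (m:Int) = ((m+1 : Nat) : Int) := by push_cast; ring
  rw [em, PySem.List.pyGetD_natCast, getD_map_range' _ _ _ _ (by omega), if_pos (by omega)]

lemma solveB_char (A : List Int) (m : Nat) :
    solve_alt ((m:Int)+2) A = PySem.Int.mod ((pvDp A (m+1)).1 + (pvDp A (m+1)).2) (10^9+7) := by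
  simp only [solve_alt]
  rw [if_neg (by omega)]
  have eb : (m:Int) + 2 - 1 = 1 + (m:Int) := by ring
  have eb2 : (m:Int) + 2 - 2 = ((m:Nat):Int) := by ring
  rw [eb, eb2]
  rw [cntB_fold m]
  have hb := bwd_fold A
      (((List.range (m+2)).map (fun j => (pvC j).1), (List.range (m+2)).map (fun j => (pvC j).2)) : List Int × List Int).1
      (((List.range (m+2)).map (fun j => (pvC j).1), (List.range (m+2)).map (fun j => (pvC j).2)) : List Int × List Int).2 m
      (fun j hj => getD_map_range' _ _ _ _ hj)
      (fun j hj => getD_map_range' _ _ _ _ hj)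
      m le_rfl 1 1 0
  simp only at hb
  rw [dot_eq A _ _ hb]
  norm_num

-- ===== VERDICT (by name: the statement is the Claim_ definition above) =====
theorem solve_spec : Claim_equal_solve := by
  intro N A hDom hPre
  unfold Spec_solve
  by_cases hN : N < 2
  · simp only [solve, solve_alt, if_pos hN]
  · obtain ⟨m, rfl⟩ : ∃ m : Nat, N = (m:Int) + 2 := ⟨(N-2).toNat, by omega⟩
    rw [solveA_char A m, solveB_char A m]
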